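-- pv_equiv track=rewrite | github.com/Yorwood/Uitility-Driven-Graph-Summariszation | UDS_Myorder.py | seekSuper
-- ===== SOURCE A (Python) =====
-- def seekSuper(u,v,V_sup_graph):
--     U_sup = tuple()
--     V_sup = tuple()
--     for tup in V_sup_graph:
--         if ( u in tup ):
--             U_sup = tup
--         if ( v in tup ):
--             V_sup = tup
--
--     return list([U_sup,V_sup])
-- ===== SOURCE B (Python) =====
-- def seekSuper(u, v, V_sup_graph):
--     U_sup = tuple()
--     V_sup = tuple()
--     u_found = False
--     v_found = False
--     for tup in reversed(V_sup_graph):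
--         if not u_found and u in tup:
--             U_sup = tup
--             u_found = True
--         if not v_found and v in tup:
--             V_sup = tup
--             v_found = True
--         if u_found and v_found:
--             break
--     return list([U_sup, V_sup])
-- ===== Notes on version B (the rewrite author's own statement) =====
-- stated objective: alternative
-- what changed: B scans the list in reverse taking the first tuple containing u (resp. v) with found-flags and an early break once both are located, instead of A's forward pass that keeps overwriting with every match.
import Mathlib
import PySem

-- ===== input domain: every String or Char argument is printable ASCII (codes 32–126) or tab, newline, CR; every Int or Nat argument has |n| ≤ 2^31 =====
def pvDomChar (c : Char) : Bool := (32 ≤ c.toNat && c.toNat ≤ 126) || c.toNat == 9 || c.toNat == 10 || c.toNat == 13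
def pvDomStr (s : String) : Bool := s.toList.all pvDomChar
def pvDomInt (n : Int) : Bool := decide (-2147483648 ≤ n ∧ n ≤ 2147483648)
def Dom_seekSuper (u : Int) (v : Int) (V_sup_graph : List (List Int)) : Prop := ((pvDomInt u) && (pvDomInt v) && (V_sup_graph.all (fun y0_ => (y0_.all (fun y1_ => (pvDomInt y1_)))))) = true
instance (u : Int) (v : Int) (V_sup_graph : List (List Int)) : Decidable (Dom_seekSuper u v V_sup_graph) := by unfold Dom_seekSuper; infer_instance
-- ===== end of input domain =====

-- B scans in reverse with found-flags and an early break (first match in reverse = A's last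
-- match in forward order); alternative decomposition, same results (return value only; neither mutates).

-- ===== PORT A =====
-- forward pass, overwriting U_sup/V_sup on every match
def seekSuper (u : Int) (v : Int) (V_sup_graph : List (List Int)) : List (List Int) :=
  let s := V_sup_graph.foldl
    (fun (s : List Int × List Int) tup =>
      let U := if u ∈ tup then tup else s.1
      let V := if v ∈ tup then tup else s.2
      (U, V)) ([], [])
  [s.1, s.2]

-- ===== PORT B =====
-- reverse scan with found-flags; stops as soon as both tuples are located
def seekLoop (u : Int) (v : Int) : List (List Int) → Bool → Bool → List Int → List Int → List Int × List Int
  | [], _, _, U, V => (U, V)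
  | tup :: rest, fu, fv, U, V =>
    let p1 := if !fu && decide (u ∈ tup) then (tup, true) else (U, fu)
    let p2 := if !fv && decide (v ∈ tup) then (tup, true) else (V, fv)
    if p1.2 && p2.2 then (p1.1, p2.1)
    else seekLoop u v rest p1.2 p2.2 p1.1 p2.1

def seekSuper_alt (u : Int) (v : Int) (V_sup_graph : List (List Int)) : List (List Int) :=
  let s := seekLoop u v V_sup_graph.reverse false false [] []
  [s.1, s.2]

-- ===== PRECONDITION & SPEC =====
def Spec_seekSuper (u : Int) (v : Int) (V_sup_graph : List (List Int)) (out : List (List Int)) : Prop := out = seekSuper_alt u v V_sup_graph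
instance (u : Int) (v : Int) (V_sup_graph : List (List Int)) (out : List (List Int)) : Decidable (Spec_seekSuper u v V_sup_graph out) := by unfold Spec_seekSuper; infer_instance

-- ===== CLAIM (what is proved, stated in full; the proofs are below) =====
def Claim_equal_seekSuper : Prop := ∀ (u : Int) (v : Int) (V_sup_graph : List (List Int)), Dom_seekSuper u v V_sup_graph → Spec_seekSuper u v V_sup_graph (seekSuper u v V_sup_graph)

-- ===== LEMMAS AND PROOFS =====

-- A's forward overwriting fold keeps, for each of u and v, the LAST matching tuple:
-- i.e. the first match of the reversed list, with the initial state as default.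
lemma seekSuper_foldl_eq (u v : Int) (l : List (List Int)) : ∀ (U V : List Int),
    l.foldl (fun (s : List Int × List Int) tup =>
      (if u ∈ tup then tup else s.1, if v ∈ tup then tup else s.2)) (U, V)
    = ((l.reverse.find? (fun t => decide (u ∈ t))).getD U,
       (l.reverse.find? (fun t => decide (v ∈ t))).getD V) := by
  induction l with
  | nil => intro U V; simp
  | cons t rest ih =>
    intro U V
    simp only [List.foldl_cons, ih, List.reverse_cons, List.find?_append]
    rcases h1 : List.find? (fun t => decide (u ∈ t)) rest.reverse with _ | x <;>
      rcases h2 : List.find? (fun t => decide (v ∈ t)) rest.reverse with _ | y <;>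
      by_cases hu : u ∈ t <;> by_cases hv : v ∈ t <;>
      simp_all [List.find?]

-- B's flagged reverse loop computes the first match (of its input list) for each of u and v,
-- unless the corresponding flag is already set, in which case it keeps the carried value.
lemma seekLoop_eq (u v : Int) (r : List (List Int)) : ∀ (fu fv : Bool) (U V : List Int),
    seekLoop u v r fu fv U V
    = (if fu then U else (r.find? (fun t => decide (u ∈ t))).getD U,
       if fv then V else (r.find? (fun t => decide (v ∈ t))).getD V) := by
  induction r with
  | nil => intro fu fv U V; simp [seekLoop]
  | cons t rest ih =>
    intro fu fv U V
    simp only [seekLoop]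
    by_cases hu : u ∈ t <;> by_cases hv : v ∈ t <;>
      cases fu <;> cases fv <;>
      simp [hu, hv, ih]

-- ===== VERDICT (by name: the statement is the Claim_ definition above) =====
theorem seekSuper_spec : Claim_equal_seekSuper := by
  intro u v g _
  unfold Spec_seekSuper seekSuper seekSuper_alt
  rw [seekSuper_foldl_eq, seekLoop_eq]
  simp
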